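-- pv_equiv track=rewrite | github.com/imn00133/algorithm | AlgorithmCodePlus/500BruteForce/Main/baekjoon_1107.py | make_close_num
-- ===== SOURCE A (Python) =====
-- def make_close_num(target, un_broken_nums):
--     close_num_list = []
--     # 각 자리마다 고장나지 않은 버튼의 값 중 차이가 가장 적은 것을 찾아 가장 가까운 값을 반환
--     while True:
--         remainder = target % 10
--         target //= 10
--         diff_num = 10
--         close_temp_num = 0
--         for value in un_broken_nums:
--             if abs(remainder - value) < diff_num:
--                 close_temp_num = value
--                 diff_num = abs(remainder - value)
--         close_num_list.append(close_temp_num)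
--         if target == 0:
--             break
--     close_num = 0
--     for index in range(len(close_num_list)):
--         close_num += close_num_list[index] * (10 ** index)
--     return close_num
-- ===== SOURCE B (Python) =====
-- def make_close_num(target, un_broken_nums):
--     # Precompute, for each digit 0..9, the closest un-broken button once (strict-< keeps first).
--     table = []
--     for d in range(10):
--         best, diff = 0, 10
--         for v in un_broken_nums:
--             a = abs(d - v)
--             if a < diff:
--                 best, diff = v, a
--         table.append(best)
--     result, power = 0, 1
--     while True:
--         result += table[target % 10] * power
--         power *= 10
--         target //= 10
--         if target == 0:
--             return result
-- ===== Notes on version B (the rewrite author's own statement) =====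
-- stated objective: alternative
-- what changed: B precomputes a 10-entry closest-button table once (removing A's rescan of un_broken_nums for every digit) and fuses digit extraction and reconstruction into a single loop with a running power, instead of A's two passes (list of per-digit winners, then a 10**index summation loop).
import Mathlib
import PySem

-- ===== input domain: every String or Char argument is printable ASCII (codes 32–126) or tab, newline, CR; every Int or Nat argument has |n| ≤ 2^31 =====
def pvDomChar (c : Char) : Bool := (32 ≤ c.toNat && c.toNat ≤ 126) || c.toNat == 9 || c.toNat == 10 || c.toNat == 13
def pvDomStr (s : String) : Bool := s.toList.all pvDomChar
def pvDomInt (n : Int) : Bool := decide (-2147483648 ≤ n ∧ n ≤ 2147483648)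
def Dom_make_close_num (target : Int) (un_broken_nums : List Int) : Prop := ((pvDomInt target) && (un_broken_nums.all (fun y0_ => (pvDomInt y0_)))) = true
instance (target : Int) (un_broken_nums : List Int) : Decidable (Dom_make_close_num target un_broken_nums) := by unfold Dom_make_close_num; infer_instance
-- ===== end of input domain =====

-- B precomputes a 10-entry closest-button table once and fuses the digit loop with a running
-- power accumulator, instead of A's per-digit rescan of un_broken_nums plus a second
-- reconstruction loop (objective: alternative decomposition).

-- ===== PORT A =====
-- A's inner 'for value in un_broken_nums' loop; state = (diff_num, close_temp_num)
def mcnScanA (r : Int) (nums : List Int) : Int × Int :=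
  nums.foldl (fun st v => if |r - v| < st.1 then (|r - v|, v) else st) (10, 0)

-- A's 'while True' loop. The fuel only makes the recursion total: the Python loop diverges
-- for target < 0 (excluded by Pre_), and for 0 ≤ target the fuel target.natAbs + 1 never runs out.
def mcnLoopA (nums : List Int) : Nat → Int → List Int → List Int
  | 0, _, acc => acc
  | fuel + 1, t, acc =>
    let r := PySem.Int.mod t 10
    let t' := PySem.Int.floordiv t 10
    let acc' := acc ++ [(mcnScanA r nums).2]
    if t' = 0 then acc' else mcnLoopA nums fuel t' acc'

def make_close_num (target : Int) (un_broken_nums : List Int) : Int :=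
  let close_num_list := mcnLoopA un_broken_nums (target.natAbs + 1) target []
  (List.range close_num_list.length).foldl
    (fun acc index => acc + close_num_list.getD index 0 * 10 ^ index) 0

-- ===== PORT B =====
-- B's inner scan computing the closest un-broken button for one digit d; state = (best, diff)
def mcnClosest (nums : List Int) (d : Int) : Int :=
  (nums.foldl (fun st v => let a := |d - v|; if a < st.2 then (v, a) else st) (0, 10)).1

-- B's fused 'while True' loop; fuel is the same totality guard as in A's port.
-- table.getD: the index t % 10 always lies in range of the 10-entry table (0 ≤ mod < 10).
def mcnLoopB (table : List Int) : Nat → Int → Int → Int → Int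
  | 0, _, result, _ => result
  | fuel + 1, t, result, power =>
    let result := result + table.getD (PySem.Int.mod t 10).toNat 0 * power
    let t' := PySem.Int.floordiv t 10
    if t' = 0 then result else mcnLoopB table fuel t' result (power * 10)

def make_close_num_alt (target : Int) (un_broken_nums : List Int) : Int :=
  let table := (List.range 10).map (fun d => mcnClosest un_broken_nums ((d : Nat) : Int))
  mcnLoopB table (target.natAbs + 1) target 0 1

-- ===== PRECONDITION & SPEC =====
-- A's 'while True' loop never terminates for a negative target (target //= 10 converges to -1);
-- Pre_ excludes exactly those inputs, on which A returns nothing at all.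
def Pre_make_close_num (target : Int) (un_broken_nums : List Int) : Prop := 0 ≤ target
instance (target : Int) (un_broken_nums : List Int) : Decidable (Pre_make_close_num target un_broken_nums) := by unfold Pre_make_close_num; infer_instance

def pvWitness_make_close_num : Int × List Int := (158, [0, 1, 4, 7])

def Spec_make_close_num (target : Int) (un_broken_nums : List Int) (out : Int) : Prop := out = make_close_num_alt target un_broken_nums
instance (target : Int) (un_broken_nums : List Int) (out : Int) : Decidable (Spec_make_close_num target un_broken_nums out) := by unfold Spec_make_close_num; infer_instance

-- ===== CLAIM (what is proved, stated in full; the proofs are below) =====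
def Claim_equal_make_close_num : Prop := ∀ (target : Int) (un_broken_nums : List Int), Dom_make_close_num target un_broken_nums → Pre_make_close_num target un_broken_nums → Spec_make_close_num target un_broken_nums (make_close_num target un_broken_nums)

-- ===== LEMMAS AND PROOFS =====

-- the two inner scans keep the same pair of accumulators in swapped order
theorem mcn_scan_eq_closest (r : Int) (nums : List Int) :
    (mcnScanA r nums).2 = mcnClosest nums r := by
  unfold mcnScanA mcnClosest
  suffices h : ∀ (l : List Int) (d c : Int),
      (l.foldl (fun st v => if |r - v| < st.1 then (|r - v|, v) else st) (d, c)).2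
        = (l.foldl (fun st v => let a := |r - v|; if a < st.2 then (v, a) else st) (c, d)).1 by
    exact h nums 10 0
  intro l
  induction l with
  | nil => intro d c; rfl
  | cons v t ih =>
    intro d c
    simp only [List.foldl_cons]
    by_cases h : |r - v| < d
    · simp only [h, if_pos h, if_true]
      exact ih _ _
    · simp only [h, if_neg h, if_false]
      exact ih _ _

-- the digit-by-digit value both loops compute, LSB first
def mcnDigits (nums : List Int) (n : Nat) : List Int :=
  if h : n < 10 then [mcnClosest nums (n : Int)]
  else mcnClosest nums ((n % 10 : Nat) : Int) :: mcnDigits nums (n / 10)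
termination_by n
decreasing_by exact Nat.div_lt_self (by omega) (by omega)

def mcnVal : List Int → Int
  | [] => 0
  | x :: xs => x + 10 * mcnVal xs

theorem mcnLoopA_eq (nums : List Int) : ∀ (fuel : Nat) (t : Int) (acc : List Int),
    0 ≤ t → t.toNat < fuel →
    mcnLoopA nums fuel t acc = acc ++ mcnDigits nums t.toNat := by
  intro fuel
  induction fuel with
  | zero => intro t acc h0 h; omega
  | succ f ih =>
    intro t acc h0 h
    have ht : t = ((t.toNat : Nat) : Int) := by omega
    have hm : PySem.Int.mod t 10 = ((t.toNat % 10 : Nat) : Int) := by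
      rw [ht]; exact_mod_cast PySem.Int.mod_natCast t.toNat 10
    have hf : PySem.Int.floordiv t 10 = ((t.toNat / 10 : Nat) : Int) := by
      rw [ht]; exact_mod_cast PySem.Int.floordiv_natCast t.toNat 10
    rw [mcnLoopA]
    rw [hm, hf, mcn_scan_eq_closest]
    by_cases hc : t.toNat < 10
    · have h10 : t.toNat / 10 = 0 := by omega
      have hmod : t.toNat % 10 = t.toNat := by omega
      rw [h10, hmod]
      have hdig : mcnDigits nums t.toNat = [mcnClosest nums ((t.toNat : Nat) : Int)] := by
        rw [mcnDigits, dif_pos hc]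
      rw [hdig]
      norm_num
    · have hne : ¬ (((t.toNat / 10 : Nat) : Int) = 0) := by omega
      rw [if_neg hne]
      rw [ih ((t.toNat / 10 : Nat) : Int) _ (by omega) (by omega), Int.toNat_natCast]
      have hdig : mcnDigits nums t.toNat
          = mcnClosest nums ((t.toNat % 10 : Nat) : Int) :: mcnDigits nums (t.toNat / 10) := by
        rw [mcnDigits, dif_neg hc]
      rw [hdig]
      simp

theorem mcn_sum_eq_val (lst : List Int) :
    (List.range lst.length).foldl (fun acc index => acc + lst.getD index 0 * 10 ^ index) 0
      = mcnVal lst := by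
  rw [PySem.List.foldl_add]
  rw [zero_add]
  induction lst with
  | nil => rfl
  | cons x xs ih =>
    simp only [List.length_cons, List.range_succ_eq_map, List.map_cons, List.map_map,
      List.sum_cons, List.getD_cons_zero, pow_zero, mul_one, mcnVal]
    have : (List.map ((fun index => (x :: xs).getD index 0 * 10 ^ index) ∘ Nat.succ)
        (List.range xs.length)).sum
        = (List.map (fun index => xs.getD index 0 * 10 ^ index * 10) (List.range xs.length)).sum := by
      apply congrArg
      apply List.map_congr_left
      intro i _
      simp [Function.comp, pow_succ]
      ring
    rw [this, List.sum_map_mul_right, ← ih]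
    ring

theorem mcnLoopB_eq (nums table : List Int)
    (htable : ∀ d : Nat, d < 10 → table.getD d 0 = mcnClosest nums (d : Int)) :
    ∀ (fuel : Nat) (t result power : Int),
    0 ≤ t → t.toNat < fuel →
    mcnLoopB table fuel t result power = result + power * mcnVal (mcnDigits nums t.toNat) := by
  intro fuel
  induction fuel with
  | zero => intro t result power h0 h; omega
  | succ f ih =>
    intro t result power h0 h
    have ht : t = ((t.toNat : Nat) : Int) := by omega
    have hm : PySem.Int.mod t 10 = ((t.toNat % 10 : Nat) : Int) := by
      rw [ht]; exact_mod_cast PySem.Int.mod_natCast t.toNat 10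
    have hf : PySem.Int.floordiv t 10 = ((t.toNat / 10 : Nat) : Int) := by
      rw [ht]; exact_mod_cast PySem.Int.floordiv_natCast t.toNat 10
    rw [mcnLoopB]
    rw [hm, hf]
    have hmodlt : t.toNat % 10 < 10 := by omega
    rw [Int.toNat_natCast, htable _ hmodlt]
    by_cases hc : t.toNat < 10
    · have h10 : t.toNat / 10 = 0 := by omega
      have hmod : t.toNat % 10 = t.toNat := by omega
      rw [h10, hmod]
      have hdig : mcnDigits nums t.toNat = [mcnClosest nums ((t.toNat : Nat) : Int)] := by
        rw [mcnDigits, dif_pos hc]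
      rw [hdig]
      norm_num [mcnVal]
      ring
    · have hne : ¬ (((t.toNat / 10 : Nat) : Int) = 0) := by omega
      rw [if_neg hne]
      rw [ih ((t.toNat / 10 : Nat) : Int) _ _ (by omega) (by omega), Int.toNat_natCast]
      have hdig : mcnDigits nums t.toNat
          = mcnClosest nums ((t.toNat % 10 : Nat) : Int) :: mcnDigits nums (t.toNat / 10) := by
        rw [mcnDigits, dif_neg hc]
      rw [hdig]
      simp only [mcnVal, Int.toNat_natCast]
      ring

-- ===== VERDICT (by name: the statement is the Claim_ definition above) =====
theorem make_close_num_spec : Claim_equal_make_close_num := by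
  intro target nums _ hpre
  unfold Spec_make_close_num make_close_num make_close_num_alt
  have h0 : (0 : Int) ≤ target := hpre
  have hfuel : target.toNat < target.natAbs + 1 := by omega
  rw [mcnLoopA_eq nums _ _ _ h0 hfuel, List.nil_append, mcn_sum_eq_val]
  rw [mcnLoopB_eq nums _ ?_ _ _ _ _ h0 hfuel]
  · ring
  · intro d hd
    rw [PySem.List.getD_map_range _ _ _ _ hd]
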